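-- pv_equiv track=rewrite | github.com/Vishal260700/Placement_Codes | Company Codes/TrexQuant.py | getStepSize
-- ===== SOURCE A (Python) =====
-- def getStepSize(arr): # get h
--     h = 0
--     lastelem = None
--
--     for i in range(0, len(arr)):
--         if(lastelem and arr[i]):
--             return h
--         elif(arr[i] and not lastelem):
--             lastelem = arr[i]
--         h += 1
-- ===== SOURCE B (Python) =====
-- def getStepSize(arr):
--     idx = [i for i, x in enumerate(arr) if x]
--     return idx[1] if len(idx) >= 2 else None
-- ===== Notes on version B (the rewrite author's own statement) =====
-- stated objective: simpler
-- what changed: B materializes the list of indices of all nonzero elements in one comprehension and returns its second entry, instead of A's stateful scan with a last-element flag, running counter and early return.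
import Mathlib
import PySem

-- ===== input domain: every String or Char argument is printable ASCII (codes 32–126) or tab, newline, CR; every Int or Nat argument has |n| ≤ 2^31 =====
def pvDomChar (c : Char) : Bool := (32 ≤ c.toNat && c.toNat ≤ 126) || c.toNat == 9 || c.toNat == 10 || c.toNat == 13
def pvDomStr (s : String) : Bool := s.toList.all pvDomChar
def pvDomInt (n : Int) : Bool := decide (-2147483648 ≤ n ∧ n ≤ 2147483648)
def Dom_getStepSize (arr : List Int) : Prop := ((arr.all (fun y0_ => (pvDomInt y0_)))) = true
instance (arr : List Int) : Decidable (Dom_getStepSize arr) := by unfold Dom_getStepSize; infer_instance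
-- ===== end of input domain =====

-- B returns the second entry of the materialized index list of nonzero elements,
-- replacing A's stateful early-exit scan (objective: simpler decomposition).

-- ===== PORT A =====
-- truthiness of the Python variable `lastelem` (None or an int)
def pvTruthyOpt (o : Option Int) : Bool :=
  match o with
  | some v => v != 0
  | none => false

-- the for-loop of A: h is the running counter, last is `lastelem`
def getStepSizeLoop : List Int → Int → Option Int → Option Int
  | [], _, _ => none
  | x :: rest, h, last =>
    if pvTruthyOpt last && x != 0 then some h
    else if x != 0 && !pvTruthyOpt last then getStepSizeLoop rest (h + 1) (some x)
    else getStepSizeLoop rest (h + 1) last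

def getStepSize (arr : List Int) : Option Int :=
  getStepSizeLoop arr 0 none

-- ===== PORT B =====
def getStepSize_alt (arr : List Int) : Option Int :=
  let idx : List Int := ((PySem.List.enumerate arr 0).filter (fun p => p.2 != 0)).map (·.1)
  if 2 ≤ idx.length then PySem.List.pyGet? idx 1 else none

-- ===== PRECONDITION & SPEC =====
def Spec_getStepSize (arr : List Int) (out : Option Int) : Prop := out = getStepSize_alt arr
instance (arr : List Int) (out : Option Int) : Decidable (Spec_getStepSize arr out) := by unfold Spec_getStepSize; infer_instance

-- ===== CLAIM =====
def Claim_equal_getStepSize : Prop := ∀ (arr : List Int), Dom_getStepSize arr → Spec_getStepSize arr (getStepSize arr)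

-- ===== LEMMAS AND PROOFS =====
-- the nonzero-index list of arr, with enumeration starting at s
def nzIdx (arr : List Int) (s : Int) : List Int :=
  ((PySem.List.enumerate arr s).filter (fun p => p.2 != 0)).map (·.1)

theorem nzIdx_nil (s : Int) : nzIdx [] s = [] := by
  simp [nzIdx, PySem.List.enumerate_nil]

theorem nzIdx_cons (x : Int) (rest : List Int) (s : Int) :
    nzIdx (x :: rest) s = (if x != 0 then [s] else []) ++ nzIdx rest (s + 1) := by
  by_cases hx : x = 0 <;> simp [nzIdx, PySem.List.enumerate_cons, hx]

-- once lastelem is a nonzero value, the loop returns the first nonzero index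
theorem loop_some (arr : List Int) : ∀ (h v : Int), v ≠ 0 →
    getStepSizeLoop arr h (some v) = (nzIdx arr h)[0]? := by
  induction arr with
  | nil => intro h v hv; simp [getStepSizeLoop, nzIdx_nil]
  | cons x rest ih =>
    intro h v hv
    by_cases hx : x = 0
    · simp [getStepSizeLoop, pvTruthyOpt, hx, nzIdx_cons, ih (h + 1) v hv]
    · simp [getStepSizeLoop, pvTruthyOpt, hx, hv, nzIdx_cons]

-- before any nonzero element is seen, the loop returns the second nonzero index
theorem loop_none (arr : List Int) : ∀ (h : Int),
    getStepSizeLoop arr h none = (nzIdx arr h)[1]? := by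
  induction arr with
  | nil => intro h; simp [getStepSizeLoop, nzIdx_nil]
  | cons x rest ih =>
    intro h
    by_cases hx : x = 0
    · simp [getStepSizeLoop, pvTruthyOpt, hx, nzIdx_cons, ih (h + 1)]
    · simp [getStepSizeLoop, pvTruthyOpt, hx, nzIdx_cons, loop_some rest (h + 1) x hx]

theorem alt_eq (arr : List Int) : getStepSize_alt arr = (nzIdx arr 0)[1]? := by
  show (if 2 ≤ (nzIdx arr 0).length then PySem.List.pyGet? (nzIdx arr 0) 1 else none)
      = (nzIdx arr 0)[1]?
  by_cases hl : 2 ≤ (nzIdx arr 0).length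
  · have : PySem.List.pyGet? (nzIdx arr 0) ((1 : Nat) : Int) = (nzIdx arr 0)[(1 : Nat)]? :=
      PySem.List.pyGet?_natCast (nzIdx arr 0) 1
    simpa [hl] using this
  · simp [hl, List.getElem?_eq_none (by omega : (nzIdx arr 0).length ≤ 1)]

-- ===== VERDICT =====
theorem getStepSize_spec : Claim_equal_getStepSize := by
  intro arr _
  show getStepSize arr = getStepSize_alt arr
  rw [getStepSize, loop_none arr 0, alt_eq]
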